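-- pv_equiv track=rewrite | github.com/goldmbappe/Freshman-Projects | reductions.py | validateReduction
-- ===== SOURCE A (Python) =====
-- def reduceOne(firstString, secondString, wordList):
--     # Here is where you will write your function to determine
--     # if the second string can be reduced from the first string
--     if firstString not in wordList or secondString not in wordList:
--         return False
--     for i in range(len(firstString)):
--         if firstString[:i] + firstString[i+1:] == secondString:
--             return True
--     return False
--
-- def validateReduction(reduction, wordList):
--     #confirms whether or not an input list 'reductions' creates a valid sequence
--     for word in reduction:
--         if word not in wordList:
--             return False
--     for i in range(len(reduction) - 1):
--         if not reduceOne(reduction[i], reduction[i+1], wordList):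
--             return False
--     return True
-- ===== SOURCE B (Python) =====
-- def validateReduction(reduction, wordList):
--     words = set(wordList)
--     for w in reduction:
--         if w not in words:
--             return False
--     for a, b in zip(reduction, reduction[1:]):
--         if len(a) != len(b) + 1:
--             return False
--         i = 0
--         while i < len(b) and a[i] == b[i]:
--             i += 1
--         if a[i + 1:] != b[i:]:
--             return False
--     return True
-- ===== Notes on version B (the rewrite author's own statement) =====
-- stated objective: alternative
-- what changed: reduceOne's try-every-deletion-position splice loop is replaced by a length check plus a single left-to-right scan to the first mismatch (one suffix comparison), the index pair loop becomes a zip over adjacent pairs, redundant per-pair membership rechecks are dropped, and membership uses a set built once.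
import Mathlib
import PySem

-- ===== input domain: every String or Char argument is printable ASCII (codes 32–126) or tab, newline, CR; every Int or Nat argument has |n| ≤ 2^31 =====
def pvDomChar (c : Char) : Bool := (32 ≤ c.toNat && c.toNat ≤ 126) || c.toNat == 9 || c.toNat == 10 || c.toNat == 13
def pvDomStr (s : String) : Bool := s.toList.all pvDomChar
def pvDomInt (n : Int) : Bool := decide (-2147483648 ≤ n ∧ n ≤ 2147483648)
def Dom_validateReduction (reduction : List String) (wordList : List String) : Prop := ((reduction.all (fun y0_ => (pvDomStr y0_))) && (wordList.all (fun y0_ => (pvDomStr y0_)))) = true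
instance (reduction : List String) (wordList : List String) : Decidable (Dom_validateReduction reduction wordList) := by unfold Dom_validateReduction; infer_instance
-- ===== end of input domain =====

-- B replaces reduceOne's try-every-deletion-position splice loop by a length check plus one
-- left-to-right scan to the first mismatch; the index pair loop becomes a zip over adjacent
-- pairs and membership uses a set built once (objective: alternative algorithm, same behaviour).

-- ===== PORT A =====
-- reduceOne: membership guard, then for i in range(len(firstString)):
--   firstString[:i] + firstString[i+1:] == secondString (slices = take/drop: 0 ≤ i < len)
def reduceOneA (firstString secondString : String) (wordList : List String) : Bool :=
  if !(wordList.contains firstString) || !(wordList.contains secondString) then false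
  else (List.range firstString.toList.length).any
        (fun i => (firstString.toList.take i ++ firstString.toList.drop (i+1)) == secondString.toList)

def validateReduction (reduction : List String) (wordList : List String) : Bool :=
  -- first loop (early return False) = all; second loop over i in range(len(reduction)-1)
  if reduction.all (fun word => wordList.contains word) then
    (List.range (reduction.length - 1)).all
      (fun i => reduceOneA (reduction.getD i "") (reduction.getD (i+1) "") wordList)
  else false

-- ===== PORT B =====
-- the while loop scanning to the first mismatch, then a[i+1:] == b[i:], as structural recursion
def scanDel : List Char → List Char → Bool
  | x :: xs, y :: ys => if x == y then scanDel xs ys else xs == y :: ys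
  | _ :: xs, []      => xs == ([] : List Char)
  | [], _            => false

def validateReduction_alt (reduction : List String) (wordList : List String) : Bool :=
  let words : PySem.Set String := PySem.Set.ofList wordList
  if reduction.all (fun w => PySem.Set.contains words w) then
    (reduction.zip reduction.tail).all
      (fun p => if p.1.toList.length == p.2.toList.length + 1
                then scanDel p.1.toList p.2.toList else false)
  else false

-- ===== PRECONDITION & SPEC =====
def Spec_validateReduction (reduction : List String) (wordList : List String) (out : Bool) : Prop := out = validateReduction_alt reduction wordList
instance (reduction : List String) (wordList : List String) (out : Bool) : Decidable (Spec_validateReduction reduction wordList out) := by unfold Spec_validateReduction; infer_instance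

-- ===== CLAIM (what is proved, stated in full; the proofs are below) =====
def Claim_equal_validateReduction : Prop := ∀ (reduction : List String) (wordList : List String), Dom_validateReduction reduction wordList → Spec_validateReduction reduction wordList (validateReduction reduction wordList)

-- ===== LEMMAS AND PROOFS =====

theorem scanDel_cons_self (b : List Char) (c : Char) : scanDel (c :: b) b = true := by
  induction b generalizing c with
  | nil => simp [scanDel]
  | cons y ys ih =>
      simp only [scanDel]
      by_cases h : c = y
      · simp [h, ih]
      · simp [h]

-- characterization: B's length check + first-mismatch scan ↔ some deletion position works
theorem scan_iff (a b : List Char) :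
    (a.length = b.length + 1 ∧ scanDel a b = true) ↔
      ∃ i, i < a.length ∧ a.take i ++ a.drop (i+1) = b := by
  induction a generalizing b with
  | nil => simp [scanDel]
  | cons x xs ih =>
      cases b with
      | nil =>
          constructor
          · rintro ⟨hlen, hscan⟩
            refine ⟨0, by simp, ?_⟩
            simpa [scanDel] using hscan
          · rintro ⟨i, _, hdel⟩
            have hxs : xs = [] := by
              cases i with
              | zero => simpa using hdel
              | succ j =>
                  exfalso
                  have := congrArg List.length hdel
                  simp at this
            subst hxs
            simp [scanDel]
      | cons y ys =>
          have split : (∃ i, i < (x :: xs).length ∧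
              (x :: xs).take i ++ (x :: xs).drop (i+1) = y :: ys) ↔
              (xs = y :: ys ∨ (x = y ∧ ∃ j, j < xs.length ∧ xs.take j ++ xs.drop (j+1) = ys)) := by
            constructor
            · rintro ⟨i, hi, hdel⟩
              cases i with
              | zero => left; simpa using hdel
              | succ j =>
                  right
                  rw [List.take_succ_cons, List.drop_succ_cons, List.cons_append,
                      List.cons_eq_cons] at hdel
                  exact ⟨hdel.1, j, by simpa using hi, hdel.2⟩
            · rintro (h | ⟨hxy, j, hj, hdel⟩)
              · exact ⟨0, by simp, by simpa using h⟩
              · exact ⟨j+1, by simpa using hj, by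
                  rw [List.take_succ_cons, List.drop_succ_cons, List.cons_append,
                      List.cons_eq_cons]; exact ⟨hxy, hdel⟩⟩
          rw [split]
          by_cases hxy : x = y
          · subst hxy
            constructor
            · rintro ⟨hlen, hscan⟩
              simp only [scanDel, beq_self_eq_true, if_true] at hscan
              right
              exact ⟨rfl, (ih ys).mp ⟨by simpa using hlen, hscan⟩⟩
            · rintro (h | ⟨_, hex⟩)
              · subst h
                refine ⟨by simp, ?_⟩
                simp only [scanDel, beq_self_eq_true, if_true]
                exact scanDel_cons_self ys x
              · obtain ⟨hlen, hscan⟩ := (ih ys).mpr hex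
                refine ⟨by simpa using hlen, ?_⟩
                simp only [scanDel, beq_self_eq_true, if_true]
                exact hscan
          · have hb : (x == y) = false := by simp [hxy]
            constructor
            · rintro ⟨hlen, hscan⟩
              simp only [scanDel, hb, Bool.false_eq_true, if_false, beq_iff_eq] at hscan
              exact Or.inl hscan
            · rintro (h | ⟨h, _⟩)
              · subst h
                refine ⟨by simp, ?_⟩
                simp [scanDel, hb]
              · exact absurd h hxy

-- A's deletion-splice loop equals B's length check + scan, as Bools
theorem anyDel_eq_scan (a b : List Char) :
    (List.range a.length).any (fun i => (a.take i ++ a.drop (i+1)) == b)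
      = ((a.length == b.length + 1) && scanDel a b) := by
  rw [Bool.eq_iff_iff]
  simp only [List.any_eq_true, List.mem_range, beq_iff_eq, Bool.and_eq_true]
  exact (scan_iff a b).symm

theorem mem_getD {l : List String} {i : Nat} (h : i < l.length) (d : String) :
    l.getD i d ∈ l := by
  rw [List.getD_eq_getElem?_getD, List.getElem?_eq_getElem h]
  exact List.getElem_mem _

theorem all_congr' {α : Type} {l : List α} {p q : α → Bool}
    (h : ∀ x ∈ l, p x = q x) : l.all p = l.all q := by
  induction l with
  | nil => rfl
  | cons x t ih =>
      simp only [List.all_cons]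
      rw [h x (by simp), ih (fun y hy => h y (by simp [hy]))]

-- index loop over adjacent pairs = zip with the tail
theorem range_pairs_eq_zip (f : String → String → Bool) (l : List String) :
    (List.range (l.length - 1)).all (fun i => f (l.getD i "") (l.getD (i+1) "")) =
      (l.zip l.tail).all (fun p => f p.1 p.2) := by
  induction l with
  | nil => simp
  | cons x t ih =>
      cases t with
      | nil => simp
      | cons y ys =>
          have hlen : (x :: y :: ys).length - 1 = ((y :: ys).length - 1) + 1 := by
            simp
          rw [hlen, List.range_succ_eq_map, List.all_cons, List.all_map]
          have hshift : ((List.range ((y :: ys).length - 1)).all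
              ((fun i => f ((x :: y :: ys).getD i "") ((x :: y :: ys).getD (i+1) "")) ∘ Nat.succ)) =
              ((List.range ((y :: ys).length - 1)).all
              (fun i => f ((y :: ys).getD i "") ((y :: ys).getD (i+1) ""))) := by
            apply all_congr'
            intro i _
            simp [Function.comp]
          rw [hshift, ih]
          simp

-- ===== VERDICT (by name: the statement is the Claim_ definition above) =====
theorem validateReduction_spec : Claim_equal_validateReduction := by
  intro reduction wordList _
  unfold Spec_validateReduction validateReduction validateReduction_alt
  have hmem : (reduction.all (fun w => PySem.Set.contains (PySem.Set.ofList wordList) w)) =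
      (reduction.all (fun w => wordList.contains w)) := by
    apply all_congr'
    intro w _
    rw [Bool.eq_iff_iff, PySem.Set.contains_iff, PySem.Set.mem_ofList, List.contains_iff_mem]
  simp only [hmem]
  by_cases hall : reduction.all (fun word => wordList.contains word) = true
  · rw [if_pos hall, if_pos hall]
    rw [← range_pairs_eq_zip (fun a b => if a.toList.length == b.toList.length + 1
          then scanDel a.toList b.toList else false) reduction]
    apply all_congr'
    intro i hi
    have hi' : i < reduction.length - 1 := List.mem_range.mp hi
    have hc1 : wordList.contains (reduction.getD i "") = true :=
      (List.all_eq_true.mp hall) _ (mem_getD (by omega) "")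
    have hc2 : wordList.contains (reduction.getD (i+1) "") = true :=
      (List.all_eq_true.mp hall) _ (mem_getD (by omega) "")
    unfold reduceOneA
    rw [hc1, hc2]
    simp only [Bool.not_true, Bool.or_self, Bool.false_eq_true, if_false]
    rw [anyDel_eq_scan]
    cases h : ((reduction.getD i "").toList.length ==
        (reduction.getD (i+1) "").toList.length + 1) <;> simp
  · rw [if_neg hall, if_neg hall]
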